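-- pv_equiv track=rewrite | github.com/UWPCE-PythonCert-ClassRepos/Self_Paced-Online | students/stefan_lund/Lesson_3/strformat_lab.py | task_four
-- ===== SOURCE A (Python) =====
-- def task_four(my_tuple):
--     """
--     my_tuple: tuple
--     my_tuple = ( 4, 30, 2017, 2, 27)  return '02 27 2017 04 30'
--     """
--     n = len(my_tuple)
--     order = 3, 4, 2, 0, 1
--     format_string = ""
--     for i in range(n):
--         format_string += "{" + str(order[i]) + ":{padding}>{str_len}" + "}"
--         if i < n - 1:
--             format_string += ", "
--
--     return format_string.format(*my_tuple, padding=0, str_len=2)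
-- ===== SOURCE B (Python) =====
-- def task_four(my_tuple):
--     order = (3, 4, 2, 0, 1)
--     return ', '.join(format(my_tuple[order[i]], '0>2') for i in range(len(my_tuple)))
-- ===== Notes on version B (the rewrite author's own statement) =====
-- stated objective: simpler
-- what changed: B drops A's meta-format-string construction (building '{3:{padding}>{str_len}}, ...' and calling .format once) and instead formats each element directly with format(my_tuple[order[i]], '0>2') over range(len(my_tuple)), joined by ', '.
import Mathlib
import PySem

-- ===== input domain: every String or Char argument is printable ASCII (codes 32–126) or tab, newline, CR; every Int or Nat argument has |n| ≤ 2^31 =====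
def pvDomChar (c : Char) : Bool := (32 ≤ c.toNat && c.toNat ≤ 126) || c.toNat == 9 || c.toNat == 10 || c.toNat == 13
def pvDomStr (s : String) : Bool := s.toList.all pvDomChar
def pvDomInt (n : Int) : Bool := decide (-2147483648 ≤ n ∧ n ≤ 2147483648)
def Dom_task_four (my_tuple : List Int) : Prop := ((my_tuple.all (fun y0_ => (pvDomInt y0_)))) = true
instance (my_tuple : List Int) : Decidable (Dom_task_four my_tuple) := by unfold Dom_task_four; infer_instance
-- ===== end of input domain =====

-- B formats each element directly with format(my_tuple[order[i]], '0>2') and joins with ', ',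
-- instead of A's meta-format string fed to .format; objective: simpler. Equal return value on Pre_.

-- ===== PORT A =====
-- Exact port of format(x, '0>2') (fill '0', align '>', width 2): pad str(x) on the left with '0'
-- up to length 2.  Shared by both ports, since both Pythons bottom out in this same format primitive.
def pad2chars (v : Int) : List Char :=
  let s := PySem.Int.toChars v
  List.replicate (2 - s.length) '0' ++ s

-- Hand-written interpreter for str.format, exact for the replacement fields A generates
-- ("{<digits>:{padding}>{str_len}}" with keywords padding=0, str_len=2, which give fill '0',
-- align '>', width 2): literal chars are copied; on '{' the positional index is read and the
-- 21-char spec ":{padding}>{str_len}}" is consumed.  Fuel = remaining char count (totality only).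
def pyFormatAux (args : List Int) : Nat → List Char → List Char
  | 0, _ => []
  | _ + 1, [] => []
  | fuel + 1, c :: rest =>
    if c = '{' then
      let ds := rest.takeWhile (fun d => d.isDigit)
      let k : Nat := ds.foldl (fun a d => a * 10 + (d.toNat - 48)) 0
      let rest2 := (rest.dropWhile (fun d => d.isDigit)).drop 21
      pad2chars (args.getD k 0) ++ pyFormatAux args fuel rest2
    else
      c :: pyFormatAux args fuel rest

-- the for-loop accumulating format_string (kept as a List Char; Lean's String.append is opaque)
def buildFormat (n : Int) : List Char :=
  (PySem.List.pyRange 0 n 1).foldl (fun acc i =>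
    let acc := acc ++ ('{' :: PySem.Int.toChars (PySem.List.pyGetD ([3, 4, 2, 0, 1] : List Int) i 0)
                        ++ ":{padding}>{str_len}".toList ++ ['}'])
    if i < n - 1 then acc ++ [',', ' '] else acc) []

def task_four (my_tuple : List Int) : String :=
  let fs : List Char := buildFormat (PySem.List.len my_tuple)
  String.ofList (pyFormatAux my_tuple fs.length fs)

-- ===== PORT B =====
-- my_tuple[order[i]] is in range on every input Pre_ admits; pyGetD's default is never reached there.
def task_four_alt (my_tuple : List Int) : String :=
  let order : List Int := [3, 4, 2, 0, 1]
  PySem.Str.join ", "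
    ((PySem.List.pyRange 0 (PySem.List.len my_tuple) 1).map
      (fun i => String.ofList (pad2chars (PySem.List.pyGetD my_tuple (PySem.List.pyGetD order i 0) 0))))

-- ===== PRECONDITION & SPEC =====
-- A raises IndexError on every tuple whose length is not 0 or 5 (replacement index 3 or 4 out of
-- range for lengths 1–4, order[i] out of range for lengths ≥ 6): exactly those inputs are excluded
-- (B raises on exactly the same inputs).
def Pre_task_four (my_tuple : List Int) : Prop :=
  my_tuple.length = 0 ∨ my_tuple.length = 5
instance (my_tuple : List Int) : Decidable (Pre_task_four my_tuple) := by
  unfold Pre_task_four; infer_instance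

def pvWitness_task_four : List Int := [4, 30, 2017, 2, 27]

def Spec_task_four (my_tuple : List Int) (out : String) : Prop := out = task_four_alt my_tuple
instance (my_tuple : List Int) (out : String) : Decidable (Spec_task_four my_tuple out) := by
  unfold Spec_task_four; infer_instance

-- ===== CLAIM (what is proved, stated in full; the proofs are below) =====
def Claim_equal_task_four : Prop := ∀ (my_tuple : List Int), Dom_task_four my_tuple → Pre_task_four my_tuple → Spec_task_four my_tuple (task_four my_tuple)

-- ===== LEMMAS AND PROOFS =====

set_option maxRecDepth 8192 in
theorem task_four_eq_alt_of_len5 (a b c d e : Int) :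
    task_four [a, b, c, d, e] = task_four_alt [a, b, c, d, e] := by
  have h : buildFormat 5 =
      "{3:{padding}>{str_len}}, {4:{padding}>{str_len}}, {2:{padding}>{str_len}}, {0:{padding}>{str_len}}, {1:{padding}>{str_len}}".toList := by
    decide
  have hr : PySem.List.pyRange 0 5 1 = [0, 1, 2, 3, 4] := by decide
  simp only [task_four, task_four_alt, PySem.List.len, List.length_cons, List.length_nil]
  norm_num [h, hr, PySem.Str.join, PySem.Chars.join, List.intercalate,
            PySem.List.pyGetD, PySem.List.pyGet?, PySem.List.pyIdx?]
  rw [show ("{3:{padding}>{str_len}}, {4:{padding}>{str_len}}, {2:{padding}>{str_len}}, {0:{padding}>{str_len}}, {1:{padding}>{str_len}}" : String).length = 123 from rfl]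
  simp [pyFormatAux, PySem.List.pyIdx?, pad2chars]
  rw [← String.toList_inj]
  simp

-- ===== VERDICT (by name: the statement is the Claim_ definition above) =====
theorem task_four_spec : Claim_equal_task_four := by
  intro t _ hp
  unfold Spec_task_four
  rcases hp with h0 | h5
  · rw [List.length_eq_zero_iff.mp h0]; rfl
  · obtain ⟨a, b, c, d, e, rfl⟩ : ∃ a b c d e, t = [a, b, c, d, e] := by
      match t, h5 with
      | [a, b, c, d, e], _ => exact ⟨a, b, c, d, e, rfl⟩
    exact task_four_eq_alt_of_len5 a b c d e
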